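-- pv_equiv track=rewrite | github.com/ossrndc/Commit2.0-contestDSA | Answer3.py | max_triangle_perimeter
-- ===== SOURCE A (Python) =====
-- def max_triangle_perimeter(n : int):
--     """
--     Calculates the maximum perimeter of a triangle that can be formed using
--     N sticks of lengths 1 to `n`.
--     The condition for forming a valid triangle is:
--         2 * max (A, B, C) < (A + B + C)
--     """
--     if n <= 3:
--         return -1 # no triangle possible
--     results = []
--     for i in range(n+1):
--         # skip the first 3 numbers as they cannot form a triangle
--         if i < 3:
--             continue
--         A = i
--         B = i - 1
--         C = i - 2
--         # check if the triangle can be formed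
--         if 2 * max(A, B, C) < (A + B + C) :
--             results.append(A + B + C)
--
--     return max(results)
-- ===== SOURCE B (Python) =====
-- def max_triangle_perimeter(n: int):
--     # Closed form: for n >= 4 the best triangle is (n, n-1, n-2), perimeter 3n-3.
--     return -1 if n <= 3 else 3 * n - 3
-- ===== Notes on version B (the rewrite author's own statement) =====
-- stated objective: faster
-- what changed: Replaced the O(n) scan over all stick triples (i, i-1, i-2) and the final max() by the closed form 3n-3 (the largest three sticks always win for n>=4).
import Mathlib
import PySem

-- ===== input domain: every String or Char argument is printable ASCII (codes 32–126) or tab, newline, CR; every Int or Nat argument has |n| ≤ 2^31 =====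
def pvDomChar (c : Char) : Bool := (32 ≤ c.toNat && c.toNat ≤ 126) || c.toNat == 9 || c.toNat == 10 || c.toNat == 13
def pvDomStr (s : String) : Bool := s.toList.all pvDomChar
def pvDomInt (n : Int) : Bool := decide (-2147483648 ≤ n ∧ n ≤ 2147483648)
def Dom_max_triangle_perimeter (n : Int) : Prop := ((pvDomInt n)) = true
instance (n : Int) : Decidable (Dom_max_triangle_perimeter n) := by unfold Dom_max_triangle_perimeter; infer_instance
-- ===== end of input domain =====

-- B replaces A's O(n) scan by the closed form 3n-3; equivalence of return values is proved for all n.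

-- ===== PORT A =====
-- the loop body of A, appending a valid perimeter to the accumulator
def pvBody_max_triangle_perimeter (acc : List Int) (i : Int) : List Int :=
  if i < 3 then acc
  else
    let A := i
    let B := i - 1
    let C := i - 2
    if 2 * (max (max A B) C) < A + B + C then acc ++ [A + B + C] else acc

def max_triangle_perimeter (n : Int) : Int :=
  if n ≤ 3 then -1
  else
    -- max(results); results is nonempty here (n ≥ 4), so the .getD default is never used
    (PySem.List.max?
      ((PySem.List.pyRange 0 (n + 1) 1).foldl pvBody_max_triangle_perimeter [])
      (fun x => x)).getD 0

-- ===== PORT B =====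
def max_triangle_perimeter_alt (n : Int) : Int :=
  if n ≤ 3 then -1 else 3 * n - 3

-- ===== PRECONDITION & SPEC =====
def Spec_max_triangle_perimeter (n : Int) (out : Int) : Prop := out = max_triangle_perimeter_alt n
instance (n : Int) (out : Int) : Decidable (Spec_max_triangle_perimeter n out) := by unfold Spec_max_triangle_perimeter; infer_instance

-- ===== CLAIM (what is proved, stated in full; the proofs are below) =====
def Claim_equal_max_triangle_perimeter : Prop := ∀ (n : Int), Dom_max_triangle_perimeter n → Spec_max_triangle_perimeter n (max_triangle_perimeter n)

-- ===== LEMMAS AND PROOFS =====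

theorem pv_max_append_singleton (L : List Int) (m x : Int)
    (h : PySem.List.max? L (fun y => y) = some m) :
    PySem.List.max? (L ++ [x]) (fun y => y) = some (max m x) := by
  cases L with
  | nil => simp [PySem.List.max?] at h
  | cons a t =>
    rw [PySem.List.max?_id_cons] at h
    injection h with h
    have hc : (a :: t) ++ [x] = a :: (t ++ [x]) := rfl
    rw [hc, PySem.List.max?_id_cons, List.foldl_append]
    simp only [List.foldl]
    rw [h]

-- invariant: after processing range(0, k+1), the max of results is 3k-3 (for k ≥ 4)
theorem pv_loop_max (k : ℕ) (hk : 4 ≤ k) :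
    PySem.List.max?
      ((PySem.List.pyRange 0 ((k : Int) + 1) 1).foldl pvBody_max_triangle_perimeter [])
      (fun y => y) = some (3 * (k : Int) - 3) := by
  induction k with
  | zero => omega
  | succ k ih =>
    by_cases hk4 : 4 ≤ k
    · have hsplit : PySem.List.pyRange 0 ((k : Int) + 1 + 1) 1
          = PySem.List.pyRange 0 ((k : Int) + 1) 1 ++ [(k : Int) + 1] := by
        exact PySem.List.pyRange_one_succ_right (by positivity)
      have hstep : pvBody_max_triangle_perimeter
          ((PySem.List.pyRange 0 ((k : Int) + 1) 1).foldl pvBody_max_triangle_perimeter [])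
          ((k : Int) + 1)
          = ((PySem.List.pyRange 0 ((k : Int) + 1) 1).foldl pvBody_max_triangle_perimeter [])
            ++ [3 * ((k : Int) + 1) - 3] := by
        have hk' : (4 : Int) ≤ (k : Int) := by exact_mod_cast hk4
        simp only [pvBody_max_triangle_perimeter]
        rw [max_eq_left (by omega), max_eq_left (by omega),
          if_neg (by omega : ¬ ((k : Int) + 1 < 3)),
          if_pos (by omega : 2 * ((k : Int) + 1)
            < ((k : Int) + 1) + ((k : Int) + 1 - 1) + ((k : Int) + 1 - 2))]
        have harith : ((k : Int) + 1) + ((k : Int) + 1 - 1) + ((k : Int) + 1 - 2)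
            = 3 * ((k : Int) + 1) - 3 := by ring
        rw [harith]
      have hk' : (4 : Int) ≤ (k : Int) := by exact_mod_cast hk4
      have hmax := pv_max_append_singleton _ _ (3 * ((k : Int) + 1) - 3) (ih hk4)
      have hcast : ((k + 1 : ℕ) : Int) = (k : Int) + 1 := by push_cast; ring
      rw [hcast, hsplit, List.foldl_append]
      simp only [List.foldl]
      rw [hstep, hmax, max_eq_right (by omega : 3 * (k : Int) - 3 ≤ 3 * ((k : Int) + 1) - 3)]
    · have hk3 : k = 3 := by omega
      subst hk3
      decide

-- ===== VERDICT (by name: the statement is the Claim_ definition above) =====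
theorem max_triangle_perimeter_spec : Claim_equal_max_triangle_perimeter := by
  intro n _
  unfold Spec_max_triangle_perimeter max_triangle_perimeter max_triangle_perimeter_alt
  by_cases h : n ≤ 3
  · simp [h]
  · rw [if_neg h, if_neg h]
    have hn : (4 : Int) ≤ n := by omega
    have hk : n = ((n.toNat : Int)) := by omega
    have hk4 : 4 ≤ n.toNat := by omega
    rw [hk, pv_loop_max n.toNat hk4]
    rfl
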